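-- pv_equiv track=rewrite | github.com/jcraig949jfi/Prometheus | cartography/v2/oeis_duplicates.py | analyze_pair
-- ===== SOURCE A (Python) =====
-- def analyze_pair(terms_a, terms_b):
--     """Classify the relationship between two sequences."""
--     # Check if one is a shifted version of the other
--     min_len = min(len(terms_a), len(terms_b))
--
--     # Check constant offset
--     if min_len >= 2:
--         diffs = [terms_a[i] - terms_b[i] for i in range(min_len)]
--         if len(set(diffs)) == 1 and diffs[0] != 0:
--             return f"constant_offset_{diffs[0]}"
--
--     # Check if identical for full overlap
--     if terms_a[:min_len] == terms_b[:min_len]: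
--         return "identical_full_overlap"
--
--     # Find divergence point
--     for i in range(min_len):
--         if terms_a[i] != terms_b[i]:
--             return f"diverge_at_term_{i}"
--
--     return "identical_full_overlap"
-- ===== SOURCE B (Python) =====
-- def analyze_pair(terms_a, terms_b):
--     """Classify the relationship between two sequences (single pass)."""
--     min_len = min(len(terms_a), len(terms_b))
--     if min_len < 2:
--         # 0 or 1 shared terms: either identical overlap or a single divergence
--         if min_len == 1 and terms_a[0] != terms_b[0]:
--             return "diverge_at_term_0"
--         return "identical_full_overlap"
--     first_diff = terms_a[0] - terms_b[0]
--     all_equal = True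
--     div_idx = -1
--     for i in range(min_len):
--         d = terms_a[i] - terms_b[i]
--         if d != first_diff:
--             all_equal = False
--         if div_idx < 0 and d != 0:
--             div_idx = i
--     if all_equal and first_diff != 0:
--         return f"constant_offset_{first_diff}"
--     if div_idx < 0:
--         return "identical_full_overlap"
--     return f"diverge_at_term_{div_idx}"
-- ===== Notes on version B (the rewrite author's own statement) =====
-- stated objective: alternative
-- what changed: A builds a full diff list plus a set to test the constant-offset case, compares slices, and then re-scans for the divergence point (three passes and two intermediate containers); B handles min_len < 2 directly and otherwise makes one pass over the indices maintaining an all-diffs-equal flag and the first divergence index, with no intermediate list, set or slice.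
import Mathlib
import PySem

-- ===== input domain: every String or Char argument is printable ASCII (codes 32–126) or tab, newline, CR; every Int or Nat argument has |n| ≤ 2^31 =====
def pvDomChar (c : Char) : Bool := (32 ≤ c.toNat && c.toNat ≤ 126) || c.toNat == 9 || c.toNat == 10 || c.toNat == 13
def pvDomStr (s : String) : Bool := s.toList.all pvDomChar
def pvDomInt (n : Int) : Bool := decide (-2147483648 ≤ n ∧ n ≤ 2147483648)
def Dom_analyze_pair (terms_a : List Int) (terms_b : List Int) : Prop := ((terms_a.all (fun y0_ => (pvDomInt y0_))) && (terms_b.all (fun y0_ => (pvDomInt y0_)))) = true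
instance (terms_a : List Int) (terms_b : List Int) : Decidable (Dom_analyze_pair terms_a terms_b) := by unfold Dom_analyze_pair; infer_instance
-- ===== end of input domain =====

-- B replaces A's three passes (diff list + set build, slice comparison, divergence scan)
-- by one fold that tracks the first divergence index and an all-diffs-equal flag (objective: alternative single-pass decomposition).

-- ===== PORT A =====
-- A's final for-loop: first index i in the index list with terms_a[i] != terms_b[i]
def analyzeDivergeLoop (ta tb : List Int) : List Int → Option Int
  | [] => none
  | i :: rest =>
    -- indices come from range(min_len), always in range, so pyGetD with default 0 is exact
    if PySem.List.pyGetD ta i 0 ≠ PySem.List.pyGetD tb i 0 then some i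
    else analyzeDivergeLoop ta tb rest

def analyze_pair (terms_a : List Int) (terms_b : List Int) : String :=
  let min_len : Int := min (PySem.List.len terms_a) (PySem.List.len terms_b)
  -- the code after the constant-offset check (A returns early from inside the if)
  let rest : String :=
    if PySem.List.slice terms_a none (some min_len) = PySem.List.slice terms_b none (some min_len) then
      "identical_full_overlap"
    else
      match analyzeDivergeLoop terms_a terms_b (PySem.List.pyRange 0 min_len 1) with
      | some i => "diverge_at_term_" ++ PySem.Int.toStr i
      | none => "identical_full_overlap"
  if 2 ≤ min_len then
    let diffs := (PySem.List.pyRange 0 min_len 1).map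
      (fun i => PySem.List.pyGetD terms_a i 0 - PySem.List.pyGetD terms_b i 0)
    if PySem.Set.len (PySem.Set.ofList diffs) = 1 ∧ PySem.List.pyGetD diffs 0 0 ≠ 0 then
      "constant_offset_" ++ PySem.Int.toStr (PySem.List.pyGetD diffs 0 0)
    else rest
  else rest

-- ===== PORT B =====
def analyze_pair_alt (terms_a : List Int) (terms_b : List Int) : String :=
  let min_len : Int := min (PySem.List.len terms_a) (PySem.List.len terms_b)
  if min_len < 2 then
    if min_len = 1 ∧ PySem.List.pyGetD terms_a 0 0 ≠ PySem.List.pyGetD terms_b 0 0 then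
      "diverge_at_term_0"
    else "identical_full_overlap"
  else
    let first_diff := PySem.List.pyGetD terms_a 0 0 - PySem.List.pyGetD terms_b 0 0
    let st := (PySem.List.pyRange 0 min_len 1).foldl
      (fun (s : Bool × Int) i =>
        let d := PySem.List.pyGetD terms_a i 0 - PySem.List.pyGetD terms_b i 0
        (if d ≠ first_diff then false else s.1,
         if s.2 < 0 ∧ d ≠ 0 then i else s.2))
      (true, -1)
    if st.1 = true ∧ first_diff ≠ 0 then
      "constant_offset_" ++ PySem.Int.toStr first_diff
    else if st.2 < 0 then "identical_full_overlap"
    else "diverge_at_term_" ++ PySem.Int.toStr st.2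

-- ===== PRECONDITION & SPEC =====
def Spec_analyze_pair (terms_a : List Int) (terms_b : List Int) (out : String) : Prop := out = analyze_pair_alt terms_a terms_b
instance (terms_a : List Int) (terms_b : List Int) (out : String) : Decidable (Spec_analyze_pair terms_a terms_b out) := by unfold Spec_analyze_pair; infer_instance

-- ===== CLAIM (what is proved, stated in full; the proofs are below) =====
def Claim_equal_analyze_pair : Prop := ∀ (terms_a : List Int) (terms_b : List Int), Dom_analyze_pair terms_a terms_b → Spec_analyze_pair terms_a terms_b (analyze_pair terms_a terms_b)

-- ===== LEMMAS AND PROOFS =====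

-- A's loop is a first-match search over the index list
theorem analyzeDivergeLoop_eq_find? (ta tb : List Int) (l : List Int) :
    analyzeDivergeLoop ta tb l
      = l.find? (fun i => decide (PySem.List.pyGetD ta i 0 ≠ PySem.List.pyGetD tb i 0)) := by
  induction l with
  | nil => rfl
  | cons i rest ih =>
    simp only [analyzeDivergeLoop, List.find?_cons]
    split_ifs with h <;> simp [h, ih]

-- the invariant of B's single fold: first component = "all diffs so far equal fd",
-- second = first index with nonzero diff (indices are nonnegative), else the start value
theorem foldB (ta tb : List Int) (fd : Int) (l : List Int) :
    ∀ (e : Bool) (c : Int), (∀ i ∈ l, 0 ≤ i) →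
      l.foldl (fun (s : Bool × Int) i =>
          (if PySem.List.pyGetD ta i 0 - PySem.List.pyGetD tb i 0 ≠ fd then false else s.1,
           if s.2 < 0 ∧ PySem.List.pyGetD ta i 0 - PySem.List.pyGetD tb i 0 ≠ 0 then i else s.2)) (e, c)
        = (e && decide (∀ i ∈ l, PySem.List.pyGetD ta i 0 - PySem.List.pyGetD tb i 0 = fd),
           if c < 0 then (l.find? (fun i => decide (PySem.List.pyGetD ta i 0 - PySem.List.pyGetD tb i 0 ≠ 0))).getD c else c) := by
  induction l with
  | nil => intro e c _; simp
  | cons i rest ih =>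
    intro e c hpos
    have hi : (0:Int) ≤ i := hpos i (by simp)
    have hrest : ∀ j ∈ rest, (0:Int) ≤ j := fun j hj => hpos j (by simp [hj])
    simp only [List.foldl_cons, List.find?_cons]
    rw [ih _ _ hrest]
    simp only [Prod.mk.injEq]
    refine ⟨?_, ?_⟩
    · by_cases hf : PySem.List.pyGetD ta i 0 - PySem.List.pyGetD tb i 0 = fd <;> simp [hf]
    · by_cases hz : PySem.List.pyGetD ta i 0 - PySem.List.pyGetD tb i 0 = 0 <;>
        by_cases hc : c < 0 <;> simp [hz, hc, not_lt.mpr hi]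

-- set(diffs) has one element iff every element equals the head
theorem setLen_cons_eq_one_iff (x : Int) (rest : List Int) :
    PySem.Set.len (PySem.Set.ofList (x :: rest)) = 1 ↔ ∀ y ∈ rest, y = x := by
  rw [PySem.Set.ofList_cons]
  constructor
  · intro h y hy
    have hlen : ((PySem.Set.ofList rest).discard x).length = 0 := by
      simpa [PySem.Set.len, PySem.List.len] using h
    have hnil : (PySem.Set.ofList rest).discard x = [] := List.eq_nil_of_length_eq_zero hlen
    by_contra hne
    have : y ∈ (PySem.Set.ofList rest).discard x := by
      rw [PySem.Set.mem_discard]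
      exact ⟨(PySem.Set.mem_ofList rest y).mpr hy, hne⟩
    simp [hnil] at this
  · intro h
    have hnil : (PySem.Set.ofList rest).discard x = [] := by
      rw [List.eq_nil_iff_forall_not_mem]
      intro y hy
      rw [PySem.Set.mem_discard, PySem.Set.mem_ofList] at hy
      exact hy.2 (h y hy.1)
    simp [hnil, PySem.Set.len]

-- equal takes iff all getD-values agree on the common prefix
theorem take_eq_iff_getD (ta tb : List Int) (n : Nat) (ha : n ≤ ta.length) (hb : n ≤ tb.length) :
    ta.take n = tb.take n ↔ ∀ k < n, ta.getD k 0 = tb.getD k 0 := by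
  constructor
  · intro h k hk
    rw [List.getD_eq_getElem _ _ (by omega), List.getD_eq_getElem _ _ (by omega)]
    have h1 : (ta.take n)[k]'(by simp; omega) = (tb.take n)[k]'(by simp; omega) := by
      simp only [h]
    simpa [List.getElem_take] using h1
  · intro h
    apply List.ext_getElem
    · simp [ha, hb]
    · intro k h1 h2
      have hk : k < n := by simp at h1; omega
      have h3 := h k hk
      rw [List.getD_eq_getElem _ _ (by omega), List.getD_eq_getElem _ _ (by omega)] at h3
      simpa [List.getElem_take] using h3

theorem analyze_pair_spec : Claim_equal_analyze_pair := by
  intro ta tb _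
  show analyze_pair ta tb = analyze_pair_alt ta tb
  simp only [analyze_pair, analyze_pair_alt, PySem.List.len_eq]
  have hm : min ((ta.length : Int)) ((tb.length : Int)) = ((min ta.length tb.length : Nat) : Int) := by
    push_cast; rfl
  simp only [hm]
  set n : Nat := min ta.length tb.length with hn
  have hle_a : n ≤ ta.length := Nat.min_le_left _ _
  have hle_b : n ≤ tb.length := Nat.min_le_right _ _
  obtain h0 | h1 | h2 : n = 0 ∨ n = 1 ∨ 2 ≤ n := by omega
  · -- n = 0 : empty overlap, both return "identical_full_overlap"
    rw [h0]
    simp [PySem.List.slice_to]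
  · -- n = 1 : single shared term
    rw [h1]
    have hta : ta ≠ [] := by intro h; rw [h] at hle_a; simp at hle_a; omega
    have htb : tb ≠ [] := by intro h; rw [h] at hle_b; simp at hle_b; omega
    obtain ⟨x, ta', rfl⟩ := List.exists_cons_of_ne_nil hta
    obtain ⟨y, tb', rfl⟩ := List.exists_cons_of_ne_nil htb
    rw [PySem.List.slice_to _ (by norm_num), PySem.List.slice_to _ (by norm_num)]
    have hone : ((1:Nat):Int).toNat = 1 := by norm_num
    rw [hone]
    have hrange : PySem.List.pyRange 0 ((1:Nat):Int) 1 = [0] := by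
      simpa using PySem.List.pyRange_one_singleton (0:Int)
    rw [hrange]
    simp only [List.take_succ_cons, List.take_zero, Nat.cast_one, PySem.List.pyGetD_zero_cons,
      analyzeDivergeLoop]
    by_cases hxy : x = y
    · simp [hxy]
    · norm_num [hxy]
      rfl
  · -- n ≥ 2 : the real case
    have h0n : (0:Int) < ((n:Nat):Int) := by exact_mod_cast (by omega : 0 < n)
    have hA2 : (2:Int) ≤ ((n:Nat):Int) := by exact_mod_cast h2
    rw [if_pos hA2, if_neg (not_lt.mpr hA2)]
    -- name the diff function and the index range
    set F : Int → Int := fun i => PySem.List.pyGetD ta i 0 - PySem.List.pyGetD tb i 0 with hF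
    set R : List Int := PySem.List.pyRange 0 ((n:Nat):Int) 1 with hR
    have hRpos : ∀ i ∈ R, (0:Int) ≤ i := by
      intro i hi; exact (PySem.List.mem_pyRange_one.mp hi).1
    have hd0 : PySem.List.pyGetD (R.map F) 0 0 = F 0 :=
      PySem.List.pyGetD_map_pyRange_of_nonneg F _ 0 0 le_rfl h0n
    have hRcons : R = 0 :: PySem.List.pyRange 1 ((n:Nat):Int) 1 := by
      rw [hR]; exact PySem.List.pyRange_one_cons h0n
    -- A's set condition is "all diffs equal the first diff"
    have hset : (PySem.Set.len (PySem.Set.ofList (R.map F)) = 1) ↔ ∀ i ∈ R, F i = F 0 := by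
      rw [hRcons, List.map_cons, setLen_cons_eq_one_iff]
      constructor
      · intro h i hi
        rcases List.mem_cons.mp hi with rfl | htail
        · rfl
        · exact h (F i) (List.mem_map_of_mem htail)
      · intro h y hy
        obtain ⟨i, hi, rfl⟩ := List.mem_map.mp hy
        exact h i (List.mem_cons_of_mem _ hi)
    -- B's fold result
    rw [foldB ta tb (F 0) R true (-1) hRpos]
    -- the two Pythons test the same predicate in their scans
    have hpred : (fun i => decide (PySem.List.pyGetD ta i 0 ≠ PySem.List.pyGetD tb i 0))
        = (fun i => decide (F i ≠ 0)) := by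
      funext i; simp [hF, sub_ne_zero]
    -- equal slices ↔ no nonzero diff on the common prefix
    have hslice : (PySem.List.slice ta none (some ((n:Nat):Int)) = PySem.List.slice tb none (some ((n:Nat):Int)))
        ↔ ∀ i ∈ R, F i = 0 := by
      rw [PySem.List.slice_to ta (by positivity), PySem.List.slice_to tb (by positivity),
        Int.toNat_natCast, take_eq_iff_getD ta tb n hle_a hle_b]
      constructor
      · intro h i hiR
        obtain ⟨h0i, hin⟩ := PySem.List.mem_pyRange_one.mp hiR
        have hi : i = ((i.toNat : Nat) : Int) := by omega
        have := h i.toNat (by omega)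
        rw [hi]
        simp only [hF, PySem.List.pyGetD_natCast]
        omega
      · intro h k hk
        have := h (k : Int) (PySem.List.mem_pyRange_one.mpr ⟨by positivity, by exact_mod_cast hk⟩)
        simp only [hF, PySem.List.pyGetD_natCast] at this
        omega
    have hm1 : ((-1:Int) < 0) := by norm_num
    rw [if_pos hm1]
    simp only [Bool.true_and, decide_eq_true_eq]
    by_cases hC : (∀ i ∈ R, F i = F 0) ∧ F 0 ≠ 0
    · -- constant offset on both sides
      have hAcond : (PySem.Set.ofList (List.map F R)).len = 1
          ∧ PySem.List.pyGetD (List.map F R) 0 0 ≠ 0 :=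
        ⟨hset.mpr hC.1, by rw [hd0]; exact hC.2⟩
      have hBcond : (∀ i ∈ R, PySem.List.pyGetD ta i 0 - PySem.List.pyGetD tb i 0 = F 0)
          ∧ PySem.List.pyGetD ta 0 0 - PySem.List.pyGetD tb 0 0 ≠ 0 := ⟨hC.1, hC.2⟩
      rw [if_pos hAcond, if_pos hBcond, hd0]
    · have hAneg : ¬((PySem.Set.ofList (List.map F R)).len = 1
          ∧ PySem.List.pyGetD (List.map F R) 0 0 ≠ 0) :=
        fun h => hC ⟨hset.mp h.1, by rw [← hd0]; exact h.2⟩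
      have hBneg : ¬((∀ i ∈ R, PySem.List.pyGetD ta i 0 - PySem.List.pyGetD tb i 0 = F 0)
          ∧ PySem.List.pyGetD ta 0 0 - PySem.List.pyGetD tb 0 0 ≠ 0) :=
        fun h => hC ⟨h.1, h.2⟩
      rw [if_neg hAneg, if_neg hBneg, analyzeDivergeLoop_eq_find?, hpred]
      rcases hfind : R.find? (fun i => decide (F i ≠ 0)) with _ | i
      · -- no divergence: identical full overlap on both sides
        have hall : ∀ i ∈ R, F i = 0 := by
          intro i hi
          have := List.find?_eq_none.mp hfind i hi
          simpa using this
        rw [if_pos (hslice.mpr hall)]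
        simp
      · -- first divergence at index i on both sides
        have hiR : i ∈ R := List.mem_of_find?_eq_some hfind
        have hFi : F i ≠ 0 := by simpa using List.find?_some hfind
        have h0i : (0:Int) ≤ i := hRpos i hiR
        rw [if_neg (fun h => hFi (hslice.mp h i hiR))]
        simp [not_lt.mpr h0i]
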